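-- pv_equiv track=rewrite | github.com/AaronGWang/BioInformaticsSpecialization | Module 2/2.3/peptide_encoding.py | encode_peptide_sequence
-- ===== SOURCE A (Python) =====
-- def encode_peptide_sequence(rna_sequence: str, peptide: str, rna_codon_table: dict) -> list:
--     '''
--     Encodes a peptide sequence into all possible RNA substrings that can translate to it.
--
--     Args:
--         rna_sequence (str): The RNA sequence to search within.
--         peptide (str): The peptide sequence to be encoded.
--         rna_codon_table (dict): A dictionary mapping RNA codons to their corresponding amino acids.
--
--     Returns:
--         list: A list of RNA substrings that can translate to the given peptide.
--     '''
--     substrings = []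
--
--     for i in range(0, len(rna_sequence) - len(peptide) * 3 + 1):
--         protein = ""
--         codon = rna_sequence[i:i + len(peptide) * 3]
--
--         for j in range(0, len(codon), 3):
--             protein += str(rna_codon_table.get(codon[j:j + 3], ''))
--
--         if protein == peptide:
--             substrings.append(codon)
--
--     return [substring.replace('U', 'T') for substring in substrings]
-- ===== SOURCE B (Python) =====
-- def encode_peptide_sequence(rna_sequence: str, peptide: str, rna_codon_table: dict) -> list:
--     '''Translate every codon start position once, grouped by reading frame, then slide
--     the peptide window over the precomputed per-frame translations (no per-window dict lookups).'''
--     n = len(rna_sequence)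
--     m = len(peptide)
--     frames = [[str(rna_codon_table.get(rna_sequence[p:p + 3], '')) for p in range(f, n, 3)]
--               for f in range(3)]
--     out = []
--     for i in range(n - 3 * m + 1):
--         q, f = divmod(i, 3)
--         if ''.join(frames[f][q:q + m]) == peptide:
--             out.append(rna_sequence[i:i + 3 * m].replace('U', 'T'))
--     return out
-- ===== Notes on version B (the rewrite author's own statement) =====
-- stated objective: alternative
-- what changed: B translates every codon start position once, grouped by the three reading frames, and then slides the peptide window over the precomputed per-frame translations, instead of A's re-slicing and dict-lookup of every codon of every window.
import Mathlib
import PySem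

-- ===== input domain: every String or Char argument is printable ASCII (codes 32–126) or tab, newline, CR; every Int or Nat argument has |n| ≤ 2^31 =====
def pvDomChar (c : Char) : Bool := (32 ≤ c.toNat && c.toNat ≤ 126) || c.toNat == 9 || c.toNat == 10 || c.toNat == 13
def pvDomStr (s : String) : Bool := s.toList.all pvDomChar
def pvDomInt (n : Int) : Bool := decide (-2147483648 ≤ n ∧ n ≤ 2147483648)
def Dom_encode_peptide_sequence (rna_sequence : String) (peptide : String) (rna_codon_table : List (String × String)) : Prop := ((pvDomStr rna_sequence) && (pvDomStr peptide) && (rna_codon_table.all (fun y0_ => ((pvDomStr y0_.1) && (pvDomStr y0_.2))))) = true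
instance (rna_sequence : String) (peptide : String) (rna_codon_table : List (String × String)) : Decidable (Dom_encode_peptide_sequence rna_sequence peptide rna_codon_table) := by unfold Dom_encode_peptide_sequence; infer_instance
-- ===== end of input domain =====

-- B translates every codon start position once, grouped by the three reading frames, and
-- slides the peptide window over the precomputed translations (no per-window dict lookups).


-- ===== PORT A =====
-- literal port of A; strings are handled as List Char (PySem.Chars); 'str()' around the
-- dict value is the identity (table values are strings under the type convention)
def encode_peptide_sequence (rna_sequence : String) (peptide : String) (rna_codon_table : List (String × String)) : List String :=
  let d : PySem.Dict String String := PySem.Dict.ofList rna_codon_table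
  let rna := rna_sequence.toList
  let pep := peptide.toList
  let substrings : List (List Char) :=
    (PySem.List.pyRange 0 ((rna.length : Int) - (pep.length : Int) * 3 + 1) 1).foldl
      (fun acc i =>
        let codon := PySem.List.slice rna (some i) (some (i + (pep.length : Int) * 3))
        let protein :=
          (PySem.List.pyRange 0 (codon.length : Int) 3).foldl
            (fun p j => p ++ (d.getD (String.ofList (PySem.List.slice codon (some j) (some (j + 3)))) "").toList)
            ([] : List Char)
        if protein = pep then acc ++ [codon] else acc)
      ([] : List (List Char))
  substrings.map (fun s => String.ofList (PySem.Chars.replace s ['U'] ['T']))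

-- ===== PORT B =====
-- literal port of Source B; 'divmod(i, 3)' is (floordiv i 3, mod i 3); ''.join is flatten
def encode_peptide_sequence_alt (rna_sequence : String) (peptide : String) (rna_codon_table : List (String × String)) : List String :=
  let d : PySem.Dict String String := PySem.Dict.ofList rna_codon_table
  let rna := rna_sequence.toList
  let pep := peptide.toList
  let n : Int := rna.length
  let m : Int := pep.length
  let frames : List (List (List Char)) :=
    (PySem.List.pyRange 0 3 1).map (fun f =>
      (PySem.List.pyRange f n 3).map (fun p =>
        (d.getD (String.ofList (PySem.List.slice rna (some p) (some (p + 3)))) "").toList))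
  (PySem.List.pyRange 0 (n - 3 * m + 1) 1).foldl
    (fun acc i =>
      let q := PySem.Int.floordiv i 3
      let f := PySem.Int.mod i 3
      if (PySem.List.slice (PySem.List.pyGetD frames f []) (some q) (some (q + m))).flatten = pep then
        acc ++ [String.ofList (PySem.Chars.replace (PySem.List.slice rna (some i) (some (i + 3 * m))) ['U'] ['T'])]
      else acc)
    ([] : List String)

-- ===== PRECONDITION & SPEC =====
def Spec_encode_peptide_sequence (rna_sequence : String) (peptide : String) (rna_codon_table : List (String × String)) (out : List String) : Prop := out = encode_peptide_sequence_alt rna_sequence peptide rna_codon_table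
instance (rna_sequence : String) (peptide : String) (rna_codon_table : List (String × String)) (out : List String) : Decidable (Spec_encode_peptide_sequence rna_sequence peptide rna_codon_table out) := by unfold Spec_encode_peptide_sequence; infer_instance

-- ===== CLAIM (what is proved, stated in full; the proofs are below) =====
def Claim_equal_encode_peptide_sequence : Prop := ∀ (rna_sequence : String) (peptide : String) (rna_codon_table : List (String × String)), Dom_encode_peptide_sequence rna_sequence peptide rna_codon_table → Spec_encode_peptide_sequence rna_sequence peptide rna_codon_table (encode_peptide_sequence rna_sequence peptide rna_codon_table)

-- ===== LEMMAS AND PROOFS =====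

-- the translated codon at absolute position p (shared shape both proteins reduce to)
def pvTrans (d : PySem.Dict String String) (rna : List Char) (p : Nat) : List Char :=
  (d.getD (String.ofList ((rna.drop p).take 3)) "").toList

-- drop/take of a map over List.range, fully inside bounds
theorem pvSliceMapRange {α : Type} (h : Nat → α) (c a m : Nat) (hb : a + m ≤ c) :
    (((List.range c).map h).drop a).take m = (List.range m).map (fun s => h (a + s)) := by
  apply List.ext_getElem
  · simp; omega
  · intro i h1 h2
    simp

-- A's inner loop at window start k equals the concatenation of translated codons
theorem pvProteinA (d : PySem.Dict String String) (rna : List Char) (k m : Nat)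
    (hk : k + 3 * m ≤ rna.length) :
    (PySem.List.pyRange 0 (((PySem.List.slice rna (some (k : Int)) (some ((k : Int) + (m : Int) * 3))).length : Int)) 3).foldl
      (fun p j => p ++ (PySem.Dict.getD d (String.ofList (PySem.List.slice (PySem.List.slice rna (some (k : Int)) (some ((k : Int) + (m : Int) * 3))) (some j) (some (j + 3)))) "").toList)
      ([] : List Char)
    = ((List.range m).map (fun s => pvTrans d rna (k + 3 * s))).flatten := by
  have hwin : PySem.List.slice rna (some (k:Int)) (some ((k:Int) + (m:Int) * 3)) = (rna.drop k).take (m*3) := by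
    have := PySem.List.slice_natCast_add (xs := rna) (j := k) (n := m*3)
    push_cast at this ⊢; exact this
  rw [hwin]
  have hlen : (((rna.drop k).take (m*3)).length : Int) = ((m*3 : Nat) : Int) := by
    simp; omega
  rw [hlen, PySem.List.pyRange_of_pos _ _ (by norm_num : (0:Int) < 3)]
  have hc : (if (0:Int) < ((m*3 : Nat) : Int) then ((((m*3 : Nat) : Int) - 0 + 3 - 1)/3).toNat else 0) = m := by
    split <;> omega
  rw [hc, PySem.List.foldl_append_eq_flatMap, List.nil_append, List.flatMap_def, List.map_map]
  congr 1
  apply List.map_congr_left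
  intro t ht
  rw [List.mem_range] at ht
  show (PySem.Dict.getD d (String.ofList (PySem.List.slice ((rna.drop k).take (m*3)) (some ((0:Int) + 3 * (t:Int))) (some ((0:Int) + 3 * (t:Int) + 3)))) "").toList = _
  have hj : ((0:Int) + 3 * (t:Int)) = ((3*t : Nat) : Int) := by push_cast; ring
  rw [hj]
  have hs3 : PySem.List.slice ((rna.drop k).take (m*3)) (some ((3*t : Nat) : Int)) (some (((3*t : Nat) : Int) + 3)) = (((rna.drop k).take (m*3)).drop (3*t)).take 3 := by
    have := PySem.List.slice_natCast_add (xs := ((rna.drop k).take (m*3))) (j := 3*t) (n := 3)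
    push_cast at this ⊢; exact this
  rw [hs3, List.drop_take, List.take_take, List.drop_drop]
  have hmin : min 3 (m*3 - 3*t) = 3 := by omega
  rw [hmin]
  rfl

-- B's window test at start k equals the same concatenation
theorem pvProteinB (d : PySem.Dict String String) (rna : List Char) (k m : Nat)
    (hk : k + 3 * m ≤ rna.length) :
    (PySem.List.slice
      (PySem.List.pyGetD
        ((PySem.List.pyRange 0 3 1).map (fun f =>
          (PySem.List.pyRange f (rna.length : Int) 3).map (fun p =>
            (PySem.Dict.getD d (String.ofList (PySem.List.slice rna (some p) (some (p + 3)))) "").toList)))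
        (PySem.Int.mod (k : Int) 3) [])
      (some (PySem.Int.floordiv (k : Int) 3)) (some (PySem.Int.floordiv (k : Int) 3 + (m : Int)))).flatten
    = ((List.range m).map (fun s => pvTrans d rna (k + 3 * s))).flatten := by
  have hmod : PySem.Int.mod (k : Int) 3 = ((k % 3 : Nat) : Int) := by
    exact_mod_cast PySem.Int.mod_natCast k 3
  have hdiv : PySem.Int.floordiv (k : Int) 3 = ((k / 3 : Nat) : Int) := by
    exact_mod_cast PySem.Int.floordiv_natCast k 3
  have h012 : PySem.List.pyRange 0 3 1 = [0, 1, 2] := by decide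
  rw [hmod, hdiv, h012, PySem.List.pyGetD_natCast]
  have hrow : ([(0:Int), 1, 2].map (fun f =>
        (PySem.List.pyRange f (rna.length : Int) 3).map (fun p =>
          (PySem.Dict.getD d (String.ofList (PySem.List.slice rna (some p) (some (p + 3)))) "").toList))).getD (k % 3) []
      = (PySem.List.pyRange ((k % 3 : Nat) : Int) (rna.length : Int) 3).map (fun p =>
          (PySem.Dict.getD d (String.ofList (PySem.List.slice rna (some p) (some (p + 3)))) "").toList) := by
    have h3 : k % 3 = 0 ∨ k % 3 = 1 ∨ k % 3 = 2 := by omega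
    rcases h3 with h | h | h <;> rw [h] <;> simp
  rw [hrow, PySem.List.pyRange_of_pos _ _ (by norm_num : (0:Int) < 3)]
  have hc3 : (if ((k % 3 : Nat) : Int) < (rna.length : Int) then
      (((rna.length : Int) - ((k % 3 : Nat) : Int) + 3 - 1)/3).toNat else 0) = (rna.length - k % 3 + 2) / 3 := by
    split <;> omega
  rw [hc3, List.map_map]
  have hsl : ∀ (g : Nat → List Char),
      PySem.List.slice ((List.range ((rna.length - k % 3 + 2) / 3)).map g)
        (some ((k / 3 : Nat) : Int)) (some (((k / 3 : Nat) : Int) + (m : Int)))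
      = (((List.range ((rna.length - k % 3 + 2) / 3)).map g).drop (k/3)).take m := by
    intro g
    have := PySem.List.slice_natCast_add (xs := (List.range ((rna.length - k % 3 + 2) / 3)).map g) (j := k/3) (n := m)
    push_cast at this ⊢; exact this
  rw [hsl, pvSliceMapRange _ _ _ _ (by omega : k/3 + m ≤ (rna.length - k % 3 + 2) / 3)]
  congr 1
  apply List.map_congr_left
  intro s _
  show (PySem.Dict.getD d (String.ofList (PySem.List.slice rna (some (((k % 3 : Nat) : Int) + 3 * ((k/3 + s : Nat) : Int))) (some (((k % 3 : Nat) : Int) + 3 * ((k/3 + s : Nat) : Int) + 3)))) "").toList = _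
  have hp : (((k % 3 : Nat) : Int) + 3 * ((k/3 + s : Nat) : Int)) = ((k + 3*s : Nat) : Int) := by push_cast; omega
  rw [hp]
  have hs3 : PySem.List.slice rna (some ((k + 3*s : Nat) : Int)) (some (((k + 3*s : Nat) : Int) + 3)) = (rna.drop (k + 3*s)).take 3 := by
    have := PySem.List.slice_natCast_add (xs := rna) (j := k + 3*s) (n := 3)
    push_cast at this ⊢; exact this
  rw [hs3]
  rfl

-- ===== VERDICT (by name: the statement is the Claim_ definition above) =====
theorem encode_peptide_sequence_spec : Claim_equal_encode_peptide_sequence := by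
  intro rna_s pep_s tbl _
  unfold Spec_encode_peptide_sequence encode_peptide_sequence encode_peptide_sequence_alt
  dsimp only
  rw [PySem.List.foldl_append_ite
        (p := fun i => (PySem.List.pyRange 0 (((PySem.List.slice rna_s.toList (some i) (some (i + (pep_s.toList.length : Int) * 3))).length : Int)) 3).foldl
          (fun p j => p ++ (PySem.Dict.getD (PySem.Dict.ofList tbl) (String.ofList (PySem.List.slice (PySem.List.slice rna_s.toList (some i) (some (i + (pep_s.toList.length : Int) * 3))) (some j) (some (j + 3)))) "").toList)
          ([] : List Char) = pep_s.toList)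
        (f := fun i => PySem.List.slice rna_s.toList (some i) (some (i + (pep_s.toList.length : Int) * 3))),
      PySem.List.foldl_append_ite
        (p := fun i => (PySem.List.slice
            (PySem.List.pyGetD
              ((PySem.List.pyRange 0 3 1).map (fun f =>
                (PySem.List.pyRange f (rna_s.toList.length : Int) 3).map (fun p =>
                  (PySem.Dict.getD (PySem.Dict.ofList tbl) (String.ofList (PySem.List.slice rna_s.toList (some p) (some (p + 3)))) "").toList)))
              (PySem.Int.mod i 3) [])
            (some (PySem.Int.floordiv i 3)) (some (PySem.Int.floordiv i 3 + (pep_s.toList.length : Int)))).flatten = pep_s.toList)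
        (f := fun i => String.ofList (PySem.Chars.replace (PySem.List.slice rna_s.toList (some i) (some (i + 3 * (pep_s.toList.length : Int)))) ['U'] ['T']))]
  rw [List.nil_append, List.nil_append, List.map_map]
  have hb : ((rna_s.toList.length : Int) - (pep_s.toList.length : Int) * 3 + 1) = ((rna_s.toList.length : Int) - 3 * (pep_s.toList.length : Int) + 1) := by ring
  rw [hb]
  have hfilter : ∀ i ∈ PySem.List.pyRange 0 ((rna_s.toList.length : Int) - 3 * (pep_s.toList.length : Int) + 1) 1,
      decide ((PySem.List.pyRange 0 (((PySem.List.slice rna_s.toList (some i) (some (i + (pep_s.toList.length : Int) * 3))).length : Int)) 3).foldl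
          (fun p j => p ++ (PySem.Dict.getD (PySem.Dict.ofList tbl) (String.ofList (PySem.List.slice (PySem.List.slice rna_s.toList (some i) (some (i + (pep_s.toList.length : Int) * 3))) (some j) (some (j + 3)))) "").toList)
          ([] : List Char) = pep_s.toList)
      = decide ((PySem.List.slice
            (PySem.List.pyGetD
              ((PySem.List.pyRange 0 3 1).map (fun f =>
                (PySem.List.pyRange f (rna_s.toList.length : Int) 3).map (fun p =>
                  (PySem.Dict.getD (PySem.Dict.ofList tbl) (String.ofList (PySem.List.slice rna_s.toList (some p) (some (p + 3)))) "").toList)))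
              (PySem.Int.mod i 3) [])
            (some (PySem.Int.floordiv i 3)) (some (PySem.Int.floordiv i 3 + (pep_s.toList.length : Int)))).flatten = pep_s.toList) := by
    intro i hi
    rw [PySem.List.mem_pyRange_one] at hi
    obtain ⟨k, rfl⟩ : ∃ k : Nat, i = (k : Int) := ⟨i.toNat, (Int.toNat_of_nonneg hi.1).symm⟩
    have hk : k + 3 * pep_s.toList.length ≤ rna_s.toList.length := by
      have := hi.2; omega
    rw [pvProteinA (PySem.Dict.ofList tbl) rna_s.toList k pep_s.toList.length hk,
        pvProteinB (PySem.Dict.ofList tbl) rna_s.toList k pep_s.toList.length hk]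
  rw [List.filter_congr hfilter]
  apply List.map_congr_left
  intro i hi
  have h33 : (i + (pep_s.toList.length : Int) * 3) = (i + 3 * (pep_s.toList.length : Int)) := by ring
  simp only [Function.comp, h33]
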